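-- pv_equiv track=rewrite | github.com/umairalipathan1980/AI-Report-Writing-Full-Stack | fullstack-app/backend/app/agents/verification_agent.py | _extract_company_info_section
-- ===== SOURCE A (Python) =====
-- def _extract_company_info_section(report_content: str):
--     """Extract company info section from report (original function)."""
--     lines = report_content.split('\n')
--     company_info_lines = []
--     content_lines = []
--
--     # Look for the first ** section which indicates start of actual content
--     in_company_info = True
--
--     for line in lines:
--         if line.strip().startswith('**') and in_company_info:
--             in_company_info = False
--             content_lines.append(line)
--         elif in_company_info:
--             company_info_lines.append(line)
--         else:
--             content_lines.append(line)
--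
--     company_info_section = '\n'.join(company_info_lines)
--     content_without_company_info = '\n'.join(content_lines)
--
--     return company_info_section, content_without_company_info
-- ===== SOURCE B (Python) =====
-- def _extract_company_info_section(report_content: str):
--     """Split report into company-info prefix and remaining content (index + slice)."""
--     lines = report_content.split('\n')
--     i = next((i for i, line in enumerate(lines) if line.strip().startswith('**')), None)
--     if i is not None:
--         company_info_lines, content_lines = lines[:i], lines[i:]
--     else:
--         company_info_lines, content_lines = lines, []
--     return '\n'.join(company_info_lines), '\n'.join(content_lines)
-- ===== Notes on version B (the rewrite author's own statement) =====
-- stated objective: simpler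
-- what changed: Replaced the stateful in_company_info flag loop with per-line appends by computing the first '**'-line index once (next over enumerate) and slicing the line list there.
import Mathlib
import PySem

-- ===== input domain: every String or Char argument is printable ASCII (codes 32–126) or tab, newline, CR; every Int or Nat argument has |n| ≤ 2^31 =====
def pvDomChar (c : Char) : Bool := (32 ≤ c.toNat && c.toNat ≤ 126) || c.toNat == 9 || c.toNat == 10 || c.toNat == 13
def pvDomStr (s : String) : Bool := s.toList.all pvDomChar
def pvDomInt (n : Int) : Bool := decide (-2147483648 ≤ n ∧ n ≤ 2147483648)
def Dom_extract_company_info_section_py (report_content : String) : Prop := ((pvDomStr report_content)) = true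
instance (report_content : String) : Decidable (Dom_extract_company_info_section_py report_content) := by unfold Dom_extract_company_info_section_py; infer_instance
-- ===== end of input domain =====

-- B splits the line list at the first '**' line's index (one lookup + slice) instead of
-- A's stateful flag loop with per-line appends; objective: simpler.

-- line.strip().startswith('**'), on code points
def pvIsContentStart (line : List Char) : Bool :=
  PySem.Chars.startswith (PySem.Chars.strip line) ['*', '*']

-- ===== PORT A =====
-- A's per-line loop body over the state (in_company_info, company_info_lines, content_lines)
def pvStepA (st : Bool × List (List Char) × List (List Char)) (line : List Char) :
    Bool × List (List Char) × List (List Char) :=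
  if pvIsContentStart line && st.1 then (false, st.2.1, st.2.2 ++ [line])
  else if st.1 then (st.1, st.2.1 ++ [line], st.2.2)
  else (st.1, st.2.1, st.2.2 ++ [line])

def extract_company_info_section_py (report_content : String) : String × String :=
  let lines := PySem.Chars.splitOn report_content.toList ['\n']
  let res := lines.foldl pvStepA (true, [], [])
  (String.ofList (PySem.Chars.join ['\n'] res.2.1), String.ofList (PySem.Chars.join ['\n'] res.2.2))

-- ===== PORT B =====
def extract_company_info_section_py_alt (report_content : String) : String × String :=
  let lines := PySem.Chars.splitOn report_content.toList ['\n']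
  match lines.findIdx? pvIsContentStart with
  | some i => (String.ofList (PySem.Chars.join ['\n'] (lines.take i)),
               String.ofList (PySem.Chars.join ['\n'] (lines.drop i)))
  | none => (String.ofList (PySem.Chars.join ['\n'] lines), String.ofList (PySem.Chars.join ['\n'] []))

-- ===== PRECONDITION & SPEC =====
def Spec_extract_company_info_section_py (report_content : String) (out : String × String) : Prop := out = extract_company_info_section_py_alt report_content
instance (report_content : String) (out : String × String) : Decidable (Spec_extract_company_info_section_py report_content out) := by unfold Spec_extract_company_info_section_py; infer_instance

-- ===== CLAIM (what is proved, stated in full; the proofs are below) =====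
def Claim_equal_extract_company_info_section_py : Prop := ∀ (report_content : String), Dom_extract_company_info_section_py report_content → Spec_extract_company_info_section_py report_content (extract_company_info_section_py report_content)

-- ===== LEMMAS AND PROOFS =====

-- once the flag is false, A only appends every remaining line to content
theorem pv_foldl_false (lines ci cl : List (List Char)) :
    lines.foldl pvStepA (false, ci, cl) = (false, ci, cl ++ lines) := by
  induction lines generalizing cl with
  | nil => simp
  | cons x xs ih =>
      simp only [List.foldl_cons, pvStepA]
      simp [ih]

-- with the flag true, A's fold computes exactly the split at the first '**' line
theorem pv_foldl_true (lines ci cl : List (List Char)) :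
    lines.foldl pvStepA (true, ci, cl) =
      match lines.findIdx? pvIsContentStart with
      | some i => (false, ci ++ lines.take i, cl ++ lines.drop i)
      | none => (true, ci ++ lines, cl) := by
  induction lines generalizing ci with
  | nil => simp
  | cons x xs ih =>
      by_cases hx : pvIsContentStart x
      · simp [pvStepA, hx, List.findIdx?_cons, pv_foldl_false]
      · rw [List.foldl_cons,
            show pvStepA (true, ci, cl) x = (true, ci ++ [x], cl) by simp [pvStepA, hx],
            ih, List.findIdx?_cons]
        cases h : xs.findIdx? pvIsContentStart <;> simp [hx, h]

-- ===== VERDICT (by name: the statement is the Claim_ definition above) =====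
theorem extract_company_info_section_py_spec : Claim_equal_extract_company_info_section_py := by
  intro s _
  unfold Spec_extract_company_info_section_py
  unfold extract_company_info_section_py extract_company_info_section_py_alt
  simp only [pv_foldl_true]
  cases h : (PySem.Chars.splitOn s.toList ['\n']).findIdx? pvIsContentStart <;> simp [h]
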